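-- pv_equiv track=rewrite | github.com/gqqnbig/ml-diff | FilterJava.py | removeNonJava
-- ===== SOURCE A (Python) =====
-- from typing import List
--
-- def findLineStartsWith(lines, str, start):
-- 	"""
-- 	if str is not found, return len(lines).
--
-- 	:param lines:
-- 	:param str:
-- 	:param start: inclusive
-- 	:return:
-- 	"""
-- 	while start < len(lines) and lines[start].startswith(str) == False:
-- 		start += 1
-- 	return start
--
-- def removeNonJava(lines: List[str]):
-- 	if len(lines) == 0:
-- 		return lines
--
-- 	if lines[0].startswith('diff --git ') == False:
-- 		return lines
--
-- 	javaLines = []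
-- 	i = 0
-- 	while i < len(lines):
-- 		nextPartIndex = findLineStartsWith(lines, 'diff --git ', i + 1)
-- 		if lines[i].rstrip().endswith('.java'):
-- 			j = findLineStartsWith(lines, '@@', i + 1)
-- 			if j < findLineStartsWith(lines, 'diff --git ', i + 1):
-- 				javaLines.extend(lines[j:nextPartIndex])
--
-- 		i = nextPartIndex
--
-- 	return javaLines
-- ===== SOURCE B (Python) =====
-- def removeNonJava(lines):
-- 	if len(lines) == 0:
-- 		return lines
-- 	if not lines[0].startswith('diff --git '):
-- 		return lines
-- 	javaLines = []
-- 	isJava = False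
-- 	collecting = False
-- 	for line in lines:
-- 		if line.startswith('diff --git '):
-- 			isJava = line.rstrip().endswith('.java')
-- 			collecting = False
-- 		elif isJava and not collecting and line.startswith('@@'):
-- 			collecting = True
-- 		if collecting:
-- 			javaLines.append(line)
-- 	return javaLines
-- ===== Notes on version B (the rewrite author's own statement) =====
-- stated objective: simpler
-- what changed: Replaced the index-marching outer loop with three findLineStartsWith scans per diff part and list slicing by one forward pass over the lines that keeps two booleans (isJava, collecting) and appends collected lines as it goes.
import Mathlib
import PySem

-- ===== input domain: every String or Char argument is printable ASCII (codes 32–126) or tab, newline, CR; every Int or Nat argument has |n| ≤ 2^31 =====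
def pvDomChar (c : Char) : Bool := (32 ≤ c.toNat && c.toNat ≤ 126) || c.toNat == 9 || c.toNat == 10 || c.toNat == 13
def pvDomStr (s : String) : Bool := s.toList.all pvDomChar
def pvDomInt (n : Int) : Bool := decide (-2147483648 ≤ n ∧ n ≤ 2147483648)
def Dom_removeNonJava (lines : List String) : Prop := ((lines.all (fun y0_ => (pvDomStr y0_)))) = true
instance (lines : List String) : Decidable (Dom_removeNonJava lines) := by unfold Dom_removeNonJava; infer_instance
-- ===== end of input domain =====

-- B replaces A's index-marching loop + findLineStartsWith scans and slicing by one
-- forward pass keeping two booleans (objective: simpler; return value only — neither mutates).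

-- ===== PORT A =====

-- findLineStartsWith: A only ever calls it with start = i+1 ≥ 1, so a Nat start is exact here.
def pvFind (lines : List String) (s : String) (start : Nat) : Nat :=
  if h : start < lines.length then
    if PySem.Str.startswith lines[start] s then start
    else pvFind lines s (start + 1)
  else start
termination_by lines.length - start

theorem pvFind_ge (lines : List String) (s : String) (start : Nat) :
    start ≤ pvFind lines s start := by
  fun_induction pvFind lines s start with
  | case1 => omega
  | case2 _ _ _ ih => omega
  | case3 => omega

-- main while loop of removeNonJava
def pvLoop (lines : List String) (i : Nat) (acc : List String) : List String :=
  if h : i < lines.length then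
    let next := pvFind lines "diff --git " (i + 1)
    let acc' :=
      if PySem.Str.endswith (PySem.Str.rstrip lines[i]) ".java" then
        let j := pvFind lines "@@" (i + 1)
        if j < next then acc ++ PySem.List.slice lines (some (j : Int)) (some (next : Int))
        else acc
      else acc
    pvLoop lines next acc'
  else acc
termination_by lines.length - i
decreasing_by have := pvFind_ge lines "diff --git " (i + 1); omega

def removeNonJava (lines : List String) : List String :=
  if lines.length = 0 then lines
  else if PySem.Str.startswith (lines.headD "") "diff --git " = false then lines
  else pvLoop lines 0 []

-- ===== PORT B =====

-- one step of B's for-loop: state = (isJava, collecting, javaLines)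
def pvStep (st : Bool × Bool × List String) (line : String) : Bool × Bool × List String :=
  let isJava := st.1
  let collecting := st.2.1
  let acc := st.2.2
  let s : Bool × Bool :=
    if PySem.Str.startswith line "diff --git " then
      (PySem.Str.endswith (PySem.Str.rstrip line) ".java", false)
    else if isJava && !collecting && PySem.Str.startswith line "@@" then
      (isJava, true)
    else (isJava, collecting)
  (s.1, s.2, if s.2 then acc ++ [line] else acc)

def removeNonJava_alt (lines : List String) : List String :=
  if lines.length = 0 then lines
  else if ¬ PySem.Str.startswith (lines.headD "") "diff --git " then lines
  else (lines.foldl pvStep (false, false, [])).2.2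

-- ===== PRECONDITION & SPEC =====
def Spec_removeNonJava (lines : List String) (out : List String) : Prop := out = removeNonJava_alt lines
instance (lines : List String) (out : List String) : Decidable (Spec_removeNonJava lines out) := by unfold Spec_removeNonJava; infer_instance

-- ===== CLAIM (what is proved, stated in full; the proofs are below) =====
def Claim_equal_removeNonJava : Prop := ∀ (lines : List String), Dom_removeNonJava lines → Spec_removeNonJava lines (removeNonJava lines)

-- ===== LEMMAS AND PROOFS =====

-- abbreviations used only by the proofs
def pvP (line : String) : Bool := PySem.Str.startswith line "diff --git "
def pvJ (line : String) : Bool := PySem.Str.startswith line "@@"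
def pvG (lines : List String) (k : Nat) (st : Bool × Bool × List String) : Bool × Bool × List String :=
  (lines.drop k).foldl pvStep st

theorem pvFind_le (lines : List String) (s : String) (start : Nat)
    (h : start ≤ lines.length) : pvFind lines s start ≤ lines.length := by
  fun_induction pvFind lines s start with
  | case1 => omega
  | case2 _ h' _ ih => exact ih (by omega)
  | case3 => omega

theorem pvFind_not (lines : List String) (s : String) (start : Nat) :
    ∀ k (hk : k < lines.length), start ≤ k → k < pvFind lines s start →
      PySem.Str.startswith lines[k] s = false := by
  fun_induction pvFind lines s start with
  | case1 => intro k hk h1 h2; omega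
  | case2 start h hs ih =>
      intro k hk h1 h2
      rcases Nat.eq_or_lt_of_le h1 with rfl | h1'
      · simpa using hs
      · exact ih k hk h1' h2
  | case3 start h => intro k hk h1 h2; omega

theorem pvFind_found (lines : List String) (s : String) (start : Nat)
    (h : pvFind lines s start < lines.length) :
    PySem.Str.startswith lines[pvFind lines s start] s = true := by
  fun_induction pvFind lines s start with
  | case1 start h' hs => simpa using hs
  | case2 _ _ _ ih => exact ih h
  | case3 start h' => omega

-- acc-linearity of one step
theorem pvStep_acc (a b : Bool) (acc : List String) (line : String) :
    pvStep (a, b, acc) line =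
      ((pvStep (a, b, []) line).1, (pvStep (a, b, []) line).2.1,
        acc ++ (pvStep (a, b, []) line).2.2) := by
  simp only [pvStep]
  split_ifs <;> simp

-- acc-extraction for the fold
theorem foldl_pvStep_acc (xs : List String) (a b : Bool) (acc : List String) :
    xs.foldl pvStep (a, b, acc) =
      ((xs.foldl pvStep (a, b, [])).1, (xs.foldl pvStep (a, b, [])).2.1,
        acc ++ (xs.foldl pvStep (a, b, [])).2.2) := by
  induction xs generalizing a b acc with
  | nil => simp
  | cons x xs ih =>
      simp only [List.foldl_cons]
      rw [pvStep_acc]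
      rcases h : pvStep (a, b, []) x with ⟨a', b', d⟩
      rw [ih a' b' (acc ++ d), ih a' b' d, ih a' b' []]
      simp

theorem pvStep_header (a b : Bool) (acc : List String) (line : String)
    (h : pvP line = true) :
    pvStep (a, b, acc) line =
      (PySem.Str.endswith (PySem.Str.rstrip line) ".java", false, acc) := by
  simp only [pvP] at h
  simp only [pvStep]
  rw [if_pos h]
  rfl

theorem pvStep_dead (acc : List String) (line : String) (hP : pvP line = false) :
    pvStep (false, false, acc) line = (false, false, acc) := by
  simp only [pvP] at hP
  simp only [pvStep]
  rw [if_neg (by simp only [hP]; exact Bool.false_ne_true), if_neg (by simp)]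
  rfl

theorem pvStep_wait (acc : List String) (line : String)
    (hP : pvP line = false) (hJ : pvJ line = false) :
    pvStep (true, false, acc) line = (true, false, acc) := by
  simp only [pvP] at hP
  simp only [pvJ] at hJ
  simp only [pvStep]
  rw [if_neg (by simp only [hP]; exact Bool.false_ne_true),
      if_neg (by simp only [hJ]; simp)]
  rfl

theorem pvStep_collect (a : Bool) (acc : List String) (line : String)
    (hP : pvP line = false) :
    pvStep (a, true, acc) line = (a, true, acc ++ [line]) := by
  simp only [pvP] at hP
  simp only [pvStep]
  rw [if_neg (by simp only [hP]; exact Bool.false_ne_true), if_neg (by simp)]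
  rfl

-- continuing the fold from index k, which is either past the end or a header line:
-- the state is forgotten and the accumulator is extracted
theorem pvG_reset (lines : List String) (k : Nat) (a b : Bool) (acc : List String)
    (h : lines.length ≤ k ∨ ∃ hk : k < lines.length, pvP lines[k] = true) :
    (pvG lines k (a, b, acc)).2.2 = acc ++ (pvG lines k (false, false, [])).2.2 := by
  rcases h with h | ⟨hk, hp⟩
  · simp [pvG, List.drop_eq_nil_of_le h]
  · have hd : lines.drop k = lines[k] :: lines.drop (k + 1) := List.drop_eq_getElem_cons hk
    simp only [pvG, hd, List.foldl_cons]
    rw [pvStep_header _ _ _ _ hp, pvStep_header _ _ _ _ hp]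
    rw [foldl_pvStep_acc]

-- dead part: isJava = false, collecting = false, no header in [k, m)
theorem pvG_dead (lines : List String) (m : Nat) (hm : m ≤ lines.length) :
    ∀ n k acc, m - k ≤ n → k ≤ m →
      (∀ p (hp : p < lines.length), k ≤ p → p < m → pvP lines[p] = false) →
      pvG lines k (false, false, acc) = pvG lines m (false, false, acc) := by
  intro n
  induction n with
  | zero =>
      intro k acc hn h1 _
      have hkm : k = m := by omega
      rw [hkm]
  | succ n ih =>
      intro k acc hn h1 h2
      by_cases hk : k < m
      · have hkl : k < lines.length := by omega
        have hd : lines.drop k = lines[k] :: lines.drop (k + 1) := List.drop_eq_getElem_cons hkl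
        have hstep := pvStep_dead acc lines[k] (h2 k hkl (le_refl _) hk)
        calc pvG lines k (false, false, acc)
            = pvG lines (k + 1) (false, false, acc) := by
              simp only [pvG, hd, List.foldl_cons, hstep]
          _ = pvG lines m (false, false, acc) :=
              ih (k + 1) acc (by omega) hk (fun p hp h1' h2' => h2 p hp (by omega) h2')
      · have hkm : k = m := by omega
        rw [hkm]

-- java part before the first @@: no header and no @@ in [k, m)
theorem pvG_wait (lines : List String) (m : Nat) (hm : m ≤ lines.length) :
    ∀ n k acc, m - k ≤ n → k ≤ m →
      (∀ p (hp : p < lines.length), k ≤ p → p < m → pvP lines[p] = false ∧ pvJ lines[p] = false) →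
      pvG lines k (true, false, acc) = pvG lines m (true, false, acc) := by
  intro n
  induction n with
  | zero =>
      intro k acc hn h1 _
      have hkm : k = m := by omega
      rw [hkm]
  | succ n ih =>
      intro k acc hn h1 h2
      by_cases hk : k < m
      · have hkl : k < lines.length := by omega
        have hd : lines.drop k = lines[k] :: lines.drop (k + 1) := List.drop_eq_getElem_cons hkl
        obtain ⟨hP, hJ⟩ := h2 k hkl (le_refl _) hk
        have hstep := pvStep_wait acc lines[k] hP hJ
        calc pvG lines k (true, false, acc)
            = pvG lines (k + 1) (true, false, acc) := by
              simp only [pvG, hd, List.foldl_cons, hstep]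
          _ = pvG lines m (true, false, acc) :=
              ih (k + 1) acc (by omega) hk (fun p hp h1' h2' => h2 p hp (by omega) h2')
      · have hkm : k = m := by omega
        rw [hkm]

-- collecting: every line in [k, m) (none a header) is appended
theorem pvG_collect (lines : List String) (a : Bool) (m : Nat) (hm : m ≤ lines.length) :
    ∀ n k acc, m - k ≤ n → k ≤ m →
      (∀ p (hp : p < lines.length), k ≤ p → p < m → pvP lines[p] = false) →
      pvG lines k (a, true, acc) = pvG lines m (a, true, acc ++ (lines.drop k).take (m - k)) := by
  intro n
  induction n with
  | zero =>
      intro k acc hn h1 _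
      have hkm : k = m := by omega
      subst hkm; simp
  | succ n ih =>
      intro k acc hn h1 h2
      by_cases hk : k < m
      · have hkl : k < lines.length := by omega
        have hd : lines.drop k = lines[k] :: lines.drop (k + 1) := List.drop_eq_getElem_cons hkl
        have hstep := pvStep_collect a acc lines[k] (h2 k hkl (le_refl _) hk)
        have htake : (lines.drop k).take (m - k)
            = lines[k] :: (lines.drop (k + 1)).take (m - (k + 1)) := by
          rw [hd]; have h5 : m - k = (m - (k + 1)) + 1 := by omega
          rw [h5, List.take_succ_cons]
        calc pvG lines k (a, true, acc)
            = pvG lines (k + 1) (a, true, acc ++ [lines[k]]) := by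
              simp only [pvG, hd, List.foldl_cons, hstep]
          _ = pvG lines m (a, true, (acc ++ [lines[k]]) ++ (lines.drop (k + 1)).take (m - (k + 1))) :=
              ih (k + 1) _ (by omega) hk (fun p hp h1' h2' => h2 p hp (by omega) h2')
          _ = pvG lines m (a, true, acc ++ (lines.drop k).take (m - k)) := by
              rw [htake]; simp
      · have hkm : k = m := by omega
        subst hkm; simp

-- the main correspondence: A's loop from a header index equals the tail of B's fold
theorem pvLoop_eq (lines : List String) :
    ∀ n i acc, lines.length - i ≤ n →
      (∀ hi : i < lines.length, pvP lines[i] = true) →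
      pvLoop lines i acc = acc ++ (pvG lines i (false, false, [])).2.2 := by
  intro n
  induction n with
  | zero =>
      intro i acc hn _
      have hi : lines.length ≤ i := by omega
      rw [pvLoop]; simp [pvG, List.drop_eq_nil_of_le hi, dif_neg (by omega : ¬ i < lines.length)]
  | succ n ih =>
      intro i acc hn hP
      by_cases hi : i < lines.length
      · have hPi := hP hi
        set next := pvFind lines "diff --git " (i + 1) with hnext
        have hge : i + 1 ≤ next := pvFind_ge lines _ _
        have hle : next ≤ lines.length := pvFind_le lines _ _ (by omega)
        have hnoP : ∀ p (hp : p < lines.length), i + 1 ≤ p → p < next → pvP lines[p] = false :=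
          fun p hp h1 h2 => pvFind_not lines _ _ p hp h1 h2
        have hnextP : ∀ hnl : next < lines.length, pvP lines[next] = true :=
          fun hnl => pvFind_found lines _ _ hnl
        have hreset : lines.length ≤ next ∨ ∃ hk : next < lines.length, pvP lines[next] = true := by
          by_cases h : next < lines.length
          · exact Or.inr ⟨h, hnextP h⟩
          · exact Or.inl (by omega)
        -- unfold one step of A's loop
        rw [pvLoop]
        simp only [dif_pos hi, ← hnext]
        -- unfold one step of B's fold
        have hd : lines.drop i = lines[i] :: lines.drop (i + 1) := List.drop_eq_getElem_cons hi
        have hBstep : pvG lines i (false, false, []) =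
            pvG lines (i + 1) (PySem.Str.endswith (PySem.Str.rstrip lines[i]) ".java", false, []) := by
          simp only [pvG, hd, List.foldl_cons, pvStep_header _ _ _ _ hPi]
        by_cases hjava : PySem.Str.endswith (PySem.Str.rstrip lines[i]) ".java" = true
        · set j := pvFind lines "@@" (i + 1) with hj
          have hjge : i + 1 ≤ j := pvFind_ge lines _ _
          have hnoJ : ∀ p (hp : p < lines.length), i + 1 ≤ p → p < j → pvJ lines[p] = false :=
            fun p hp h1 h2 => pvFind_not lines _ _ p hp h1 h2
          by_cases hjlt : j < next
          · -- found a hunk: A extends with lines[j:next]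
            have hjl : j < lines.length := by omega
            have hJj : pvJ lines[j] = true := pvFind_found lines _ _ hjl
            have hPj : pvP lines[j] = false := hnoP j hjl hjge hjlt
            have hdj : lines.drop j = lines[j] :: lines.drop (j + 1) := List.drop_eq_getElem_cons hjl
            have hstepj : pvStep (true, false, ([] : List String)) lines[j] = (true, true, [lines[j]]) := by
              simp only [pvP] at hPj
              simp only [pvJ] at hJj
              simp only [pvStep]
              rw [if_neg (by simp only [hPj]; exact Bool.false_ne_true),
                  if_pos (by simp only [hJj]; simp)]
              rfl
            have hwait : pvG lines (i + 1) (true, false, []) = pvG lines j (true, false, []) :=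
              pvG_wait lines j (by omega) (j - (i + 1)) (i + 1) [] (by omega) hjge
                (fun p hp h1 h2 => ⟨hnoP p hp h1 (by omega), hnoJ p hp h1 h2⟩)
            have hcoll : pvG lines j (true, false, []) =
                pvG lines next (true, true, lines[j] :: (lines.drop (j + 1)).take (next - (j + 1))) := by
              rw [show pvG lines j (true, false, ([] : List String))
                    = pvG lines (j + 1) (true, true, [lines[j]]) by
                  simp only [pvG, hdj, List.foldl_cons, hstepj]]
              rw [pvG_collect lines true next hle (next - (j + 1)) (j + 1) [lines[j]] (by omega) (by omega)
                  (fun p hp h1 h2 => hnoP p hp (by omega) h2)]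
              simp
            have hslice : PySem.List.slice lines (some (j : Int)) (some (next : Int))
                = lines[j] :: (lines.drop (j + 1)).take (next - (j + 1)) := by
              rw [PySem.List.slice_natCast, hdj]
              have : next - j = (next - (j + 1)) + 1 := by omega
              rw [this, List.take_succ_cons]
            rw [if_pos hjava, if_pos hjlt]
            rw [ih next _ (by omega) hnextP, hBstep, hjava, hwait, hcoll,
                pvG_reset lines next true true _ hreset, hslice]
            simp
          · -- no hunk before the next part
            have hwait : pvG lines (i + 1) (true, false, []) = pvG lines next (true, false, []) :=
              pvG_wait lines next hle (next - (i + 1)) (i + 1) [] (by omega) (by omega)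
                (fun p hp h1 h2 => ⟨hnoP p hp h1 h2, hnoJ p hp h1 (by omega)⟩)
            rw [if_pos hjava, if_neg hjlt]
            rw [ih next _ (by omega) hnextP, hBstep, hjava, hwait,
                pvG_reset lines next true false [] hreset]
            simp
        · -- not a java part
          have hdead : pvG lines (i + 1) (false, false, []) = pvG lines next (false, false, []) :=
            pvG_dead lines next hle (next - (i + 1)) (i + 1) [] (by omega) (by omega) hnoP
          rw [if_neg hjava]
          rw [ih next _ (by omega) hnextP, hBstep, eq_false_of_ne_true hjava, hdead]
      · rw [pvLoop]
        simp [pvG, List.drop_eq_nil_of_le (by omega : lines.length ≤ i), dif_neg hi]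

-- ===== VERDICT (by name: the statement is the Claim_ definition above) =====
theorem removeNonJava_spec : Claim_equal_removeNonJava := by
  intro lines _
  unfold Spec_removeNonJava removeNonJava removeNonJava_alt
  by_cases h0 : lines.length = 0
  · simp [h0]
  · rw [if_neg h0, if_neg h0]
    by_cases hP : PySem.Str.startswith (lines.headD "") "diff --git " = true
    · rw [if_neg (by simp only [hP]; decide), if_neg (by simp only [hP]; decide)]
      have hne : lines ≠ [] := by intro h; simp [h] at h0
      have hP0 : pvP lines[0] = true := by
        unfold pvP
        rwa [show lines[0]'(by omega) = lines.headD "" by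
          cases lines with | nil => simp at hne | cons a l => simp]
      rw [pvLoop_eq lines lines.length 0 [] (by omega) (fun _ => hP0)]
      simp [pvG]
    · rw [if_pos (by simp only [Bool.not_eq_true] at hP; exact hP), if_pos hP]
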